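/- GENERATED by farm/mkstatement.py from design/units.tsv (unit `imdct_step3_inner_r_loop.COMPOSITION`) and the Specs of Vorbis/Spec/*.lean — do not edit.
   THE STATEMENT of the proof unit `imdct_step3_inner_r_loop.COMPOSITION`: the function `imdct_step3_inner_r_loop` (210 instructions) satisfies its contract,
   GIVEN THE STATEMENTS OF ITS 4 SEGMENTS (`Vorbis.Spec.imdct_step3_inner_r_loop.Seg<k> Lay μ u₀`: what the unit `imdct_step3_inner_r_loop.<k>` proves).
   No machine code is walked: `ReachVia.trans` along the segments (the exit assertion of a segment is the entry assertion of
   its successor), an induction on the loop measures. What the names mean: Vorbis/Spec/Basic.lean. The theorem to prove: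
   `theorem imdct_step3_inner_r_loop_COMPOSITION_ok : Vorbis.Spec.imdct_step3_inner_r_loop_COMPOSITION.Statement`. -/
import Vorbis.Spec.Mdct
namespace Vorbis.Spec.imdct_step3_inner_r_loop_COMPOSITION
open X86 X86.User Asan

/-- The statement of unit `imdct_step3_inner_r_loop.COMPOSITION`. -/
def Statement : Prop :=
  ∀ (Lay : Layout) (_hLay : Lay.hi = 0x1000000) (μ : Microarch) (_hμ : UserX.MicroOK μ) (u₀ : State)
    (_h_imdct_step3_inner_r_loop_1 : Vorbis.Spec.imdct_step3_inner_r_loop.Seg1 Lay μ u₀)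
    (_h_imdct_step3_inner_r_loop_2 : Vorbis.Spec.imdct_step3_inner_r_loop.Seg2 Lay μ u₀)
    (_h_imdct_step3_inner_r_loop_3 : Vorbis.Spec.imdct_step3_inner_r_loop.Seg3 Lay μ u₀)
    (_h_imdct_step3_inner_r_loop_4 : Vorbis.Spec.imdct_step3_inner_r_loop.Seg4 Lay μ u₀),
    ∀ (others : List Obj) (frames : List (Nat × FrameLayout)) (len i0 koff k1 : Nat), Calls Lay μ Vorbis.WayInv (Vorbis.conv u₀) Vorbis.L.imdct_step3_inner_r_loop.entry (Vorbis.Spec.imdct_step3_inner_r_loop.spec others frames len i0 koff k1)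

end Vorbis.Spec.imdct_step3_inner_r_loop_COMPOSITION
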